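-- pv_equiv track=rewrite | github.com/ssf2xguile/LT4Code-for-MyResearch | LT4Code-main/API_seq_rec/Integration/investigate_lcp_index.py | check_matching_lines
-- ===== SOURCE A (Python) =====
-- def join_api_methods(line):
--     parts = line.split(' ')
--     methods = []
--     current_method = []
--     for part in parts:
--         if '.' in part:
--             if current_method:
--                 current_method.append(part)
--                 methods.append(' '.join(current_method))
--                 current_method = []
--             else:
--                 methods.append(part)
--         else:
--             current_method.append(part)
--     return methods
--
-- def check_matching_lines(txt_lines, test_lines):
--     matching_indices = []
--     for i, txt_line in enumerate(txt_lines):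
--         txt_methods = join_api_methods(txt_line)
--         for test_line in test_lines:
--             test_methods = join_api_methods(test_line)
--             match_found = False
--             for txt_method in txt_methods:
--                 if txt_method in test_methods:
--                     match_found = True
--                     break
--             if match_found:
--                 matching_indices.append(i + 1)  # 1-based index
--                 break
--     return matching_indices
-- ===== SOURCE B (Python) =====
-- def join_api_methods(line):
--     parts = line.split(' ')
--     methods = []
--     current_method = []
--     for part in parts:
--         if '.' in part:
--             if current_method:
--                 current_method.append(part)
--                 methods.append(' '.join(current_method))
--                 current_method = []
--             else:
--                 methods.append(part)
--         else:
--             current_method.append(part)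
--     return methods
--
-- def check_matching_lines(txt_lines, test_lines):
--     # one pass over the test lines: union of all their methods
--     test_methods = set()
--     for line in test_lines:
--         test_methods.update(join_api_methods(line))
--     # one pass over the txt lines: keep 1-based indices sharing a method
--     return [i for i, line in enumerate(txt_lines, 1)
--             if not test_methods.isdisjoint(join_api_methods(line))]
-- ===== Notes on version B (the rewrite author's own statement) =====
-- stated objective: faster
-- what changed: B precomputes the union set of all test-line methods in one pass and then makes a single pass over txt_lines testing set-disjointness, eliminating A's re-parsing of every test line for every txt line and the nested membership scans.
import Mathlib
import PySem

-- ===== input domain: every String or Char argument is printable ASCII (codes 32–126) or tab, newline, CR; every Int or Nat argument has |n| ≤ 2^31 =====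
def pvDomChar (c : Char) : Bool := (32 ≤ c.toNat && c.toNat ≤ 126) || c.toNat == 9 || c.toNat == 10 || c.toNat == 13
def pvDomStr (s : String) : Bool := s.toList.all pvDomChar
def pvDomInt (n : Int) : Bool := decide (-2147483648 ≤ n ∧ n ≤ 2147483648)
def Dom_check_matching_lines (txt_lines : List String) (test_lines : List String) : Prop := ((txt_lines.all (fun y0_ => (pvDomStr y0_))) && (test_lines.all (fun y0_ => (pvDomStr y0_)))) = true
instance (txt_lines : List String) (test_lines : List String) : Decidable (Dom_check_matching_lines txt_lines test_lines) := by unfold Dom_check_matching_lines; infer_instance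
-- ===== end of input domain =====

-- B replaces A's per-pair rescanning (recomputing every test line's methods for every txt line)
-- by one precomputed set of all test-line methods and a single pass over txt_lines (objective: faster).

-- ===== PORT A =====
-- shared helper, used verbatim by both programs
def join_api_methods (line : String) : List String :=
  let parts := (PySem.Str.split? line " ").getD []   -- split? is some for nonempty separator; getD never fires
  let st := parts.foldl (fun (st : List String × List String) part =>
    if PySem.Str.isIn "." part then
      if st.2 ≠ [] then
        (st.1 ++ [PySem.Str.join " " (st.2 ++ [part])], [])
      else
        (st.1 ++ [part], st.2)
    else
      (st.1, st.2 ++ [part])) ([], [])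
  st.1

def check_matching_lines (txt_lines : List String) (test_lines : List String) : List Int :=
  (PySem.List.enumerate txt_lines 0).foldl (fun matching_indices p =>
    let txt_methods := join_api_methods p.2
    -- inner 'for test_line … for txt_method … break' = short-circuiting any
    if test_lines.any (fun test_line =>
        let test_methods := join_api_methods test_line
        txt_methods.any (fun txt_method => test_methods.contains txt_method))
    then matching_indices ++ [p.1 + 1]
    else matching_indices) []

-- ===== PORT B =====
def check_matching_lines_alt (txt_lines : List String) (test_lines : List String) : List Int :=
  let test_methods : PySem.Set String :=
    test_lines.foldl (fun s line => PySem.Set.update s (join_api_methods line)) PySem.Set.empty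
  (PySem.List.enumerate txt_lines 1).filterMap (fun p =>
    if PySem.Set.isdisjoint test_methods (join_api_methods p.2) then none else some p.1)

-- ===== PRECONDITION & SPEC =====
def Spec_check_matching_lines (txt_lines : List String) (test_lines : List String) (out : List Int) : Prop := out = check_matching_lines_alt txt_lines test_lines
instance (txt_lines : List String) (test_lines : List String) (out : List Int) : Decidable (Spec_check_matching_lines txt_lines test_lines out) := by unfold Spec_check_matching_lines; infer_instance

-- ===== CLAIM (what is proved, stated in full; the proofs are below) =====
def Claim_equal_check_matching_lines : Prop := ∀ (txt_lines : List String) (test_lines : List String), Dom_check_matching_lines txt_lines test_lines → Spec_check_matching_lines txt_lines test_lines (check_matching_lines txt_lines test_lines)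

-- ===== LEMMAS AND PROOFS =====

-- membership in B's precomputed set = some test line contains the method
theorem mem_test_set (test_lines : List String) (s : PySem.Set String) (m : String) :
    m ∈ test_lines.foldl (fun s line => PySem.Set.update s (join_api_methods line)) s ↔
      m ∈ s ∨ ∃ t ∈ test_lines, m ∈ join_api_methods t := by
  induction test_lines generalizing s with
  | nil => simp
  | cons t ts ih =>
    simp [List.foldl_cons, ih, PySem.Set.mem_update]
    tauto

-- A's inner double loop and B's disjointness test agree on every line
theorem cond_eq (test_lines : List String) (x : String) :
    (test_lines.any (fun test_line =>
        let test_methods := join_api_methods test_line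
        (join_api_methods x).any (fun txt_method => test_methods.contains txt_method)))
      = ! PySem.Set.isdisjoint
          (test_lines.foldl (fun s line => PySem.Set.update s (join_api_methods line)) PySem.Set.empty)
          (join_api_methods x) := by
  rw [Bool.eq_iff_iff]
  simp only [List.any_eq_true, List.contains_iff_mem, Bool.not_eq_eq_eq_not, Bool.not_true, ← Bool.not_eq_true, PySem.Set.isdisjoint_iff]
  constructor
  · rintro ⟨t, ht, m, hm, hmt⟩ h
    exact h m ((mem_test_set _ _ _).2 (Or.inr ⟨t, ht, hmt⟩)) hm
  · intro h
    push Not at h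
    obtain ⟨m, hmS, hmx⟩ := h
    rcases (mem_test_set _ _ _).1 hmS with h | ⟨t, ht, hmt⟩
    · simp [PySem.Set.empty] at h
    · exact ⟨t, ht, m, hmx, hmt⟩

-- A's append-on-match fold over enumerate(·,0) (+1) = B's comprehension over enumerate(·,1)
theorem fold_eq (test_lines : List String) (txt_lines : List String) (s : Int) (acc : List Int) :
    (PySem.List.enumerate txt_lines s).foldl (fun matching_indices p =>
      let txt_methods := join_api_methods p.2
      if test_lines.any (fun test_line =>
          let test_methods := join_api_methods test_line
          txt_methods.any (fun txt_method => test_methods.contains txt_method))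
      then matching_indices ++ [p.1 + 1]
      else matching_indices) acc
    = acc ++ (PySem.List.enumerate txt_lines (s + 1)).filterMap (fun p =>
        if PySem.Set.isdisjoint
            (test_lines.foldl (fun s line => PySem.Set.update s (join_api_methods line)) PySem.Set.empty)
            (join_api_methods p.2)
        then none else some p.1) := by
  induction txt_lines generalizing s acc with
  | nil => simp [PySem.List.enumerate_nil]
  | cons x xs ih =>
    rw [PySem.List.enumerate_cons, PySem.List.enumerate_cons]
    have h := cond_eq test_lines x
    rcases hb : PySem.Set.isdisjoint
        (test_lines.foldl (fun s line => PySem.Set.update s (join_api_methods line)) PySem.Set.empty)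
        (join_api_methods x) with _ | _ <;>
      rw [hb] at h <;>
      simp only [Bool.not_false, Bool.not_true] at h <;>
      simp only [List.foldl_cons, List.filterMap_cons] <;> rw [ih] <;>
      simp only [h, hb, reduceIte, List.append_assoc, List.singleton_append, List.nil_append]
    all_goals rfl

-- ===== VERDICT (by name: the statement is the Claim_ definition above) =====
theorem check_matching_lines_spec : Claim_equal_check_matching_lines := by
  intro txt_lines test_lines _
  unfold Spec_check_matching_lines check_matching_lines check_matching_lines_alt
  simpa using fold_eq test_lines txt_lines 0 []
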